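-- pv_equiv track=rewrite | github.com/gtavella/Esami | 19-02-20/es2.py | verifica_liste
-- ===== SOURCE A (Python) =====
-- def hanno_sottoliste_uguali(lista1, lista2):
--     # itera per ogni elemento di lista1
--     # ogni elemento nella lista1 deve essere all'elemento allo stesso indice in lista2
--     for i in range(len(lista1)):
--         # se esiste almeno un elemento all'indice i che non e' diverso dall'elemento allo stesso indice in lista2
--         if lista1[i] != lista2[i]:
--             return False
--     return True
--
-- def verifica_liste(L1,L2,k):
--     esiste_sottolista_uguale = False
--     # siccome voglio selezionare la sottolista anche dell'ultimo elemento, allora aggiungo 1 come indice dove fermare l'iterazione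
--     for i in range(len(L1)-k+1):
--         # seleziona k elementi di L1
--         sottolista1 = L1[i:i+k]
--         # per ogni sottolista di L1, verifico ogni sottolista di L2
--         # relazione dei loop: una sottolista di L1 - ogni sottolista di L2
--         j=0
--         while not esiste_sottolista_uguale and j<len(L2)-k+1:
--             sottolista2 = L2[j:j+k]
--             if hanno_sottoliste_uguali(sottolista1, sottolista2):
--                 # hai trovato due sottoliste uguali, quindi ritorna subito vero
--                 return True
--             j += 1
--     # se dopo aver comparato tutte le sottoliste di L1 ed L2 non ne esiste nessuna uguale, allora ritorna falso
--     if not esiste_sottolista_uguale: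
--         return False
--
-- L1 = [1, 2, 3, 7, 3, 5, 3]
--
-- L2 = [8, 7, 3, 5, 4]
--
-- k = 3
-- ===== SOURCE B (Python) =====
-- def verifica_liste(L1, L2, k):
--     windows2 = {tuple(L2[j:j+k]) for j in range(len(L2)-k+1)}
--     return any(tuple(L1[i:i+k]) in windows2 for i in range(len(L1)-k+1))
-- ===== Notes on version B (the rewrite author's own statement) =====
-- stated objective: faster
-- what changed: B builds a hash set of all length-k windows of L2 once and then checks each window of L1 with an O(1) set lookup, replacing A's triple nested scan (every L1-window against every L2-window, compared element by element).
-- outside the precondition, e.g. on verifica_liste([], [], -1): A returns True, B returns True; on verifica_liste([1, 2], [], -1): A raises IndexError, B returns True; on verifica_liste([1], [2], -2147483648): A returns True, B does not finish within the time limit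
import Mathlib
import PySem

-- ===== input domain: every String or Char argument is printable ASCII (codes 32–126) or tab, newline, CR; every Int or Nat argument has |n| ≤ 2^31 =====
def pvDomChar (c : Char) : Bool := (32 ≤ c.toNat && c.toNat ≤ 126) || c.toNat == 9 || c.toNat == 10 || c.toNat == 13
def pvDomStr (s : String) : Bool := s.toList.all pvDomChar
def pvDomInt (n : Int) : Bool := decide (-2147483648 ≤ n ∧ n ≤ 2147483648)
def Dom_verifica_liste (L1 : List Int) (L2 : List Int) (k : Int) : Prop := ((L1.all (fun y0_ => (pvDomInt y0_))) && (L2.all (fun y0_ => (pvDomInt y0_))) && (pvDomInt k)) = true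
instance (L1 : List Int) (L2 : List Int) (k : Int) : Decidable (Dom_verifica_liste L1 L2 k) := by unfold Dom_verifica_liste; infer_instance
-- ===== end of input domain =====

-- B replaces A's nested window-by-window scan with a set of L2's k-windows and one lookup per L1-window (asymptotically faster).


-- ===== PORT A =====
-- for i in range(len(lista1)): if lista1[i] != lista2[i]: return False / return True.
-- lista2[i] raises IndexError when lista2 is shorter; inside Pre_ the two slices have
-- equal length, so the 'pyGet? = none' branch (here: a mismatch, hence false) is never reached.
def hanno_sottoliste_uguali (lista1 : List Int) (lista2 : List Int) : Bool :=
  (PySem.List.pyRange 0 (lista1.length : Int) 1).all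
    (fun i => PySem.List.pyGet? lista1 i == PySem.List.pyGet? lista2 i)

-- the inner 'while not esiste_sottolista_uguale and j<len(L2)-k+1' loop, with its early
-- 'return True'; the flag esiste_sottolista_uguale is never set, so only the bound remains
def verifica_inner (sottolista1 : List Int) (L2 : List Int) (k : Int) (j : Int) (stop : Int) : Bool :=
  if h : j < stop then
    if hanno_sottoliste_uguali sottolista1 (PySem.List.slice L2 (some j) (some (j + k))) then
      true
    else
      verifica_inner sottolista1 L2 k (j + 1) stop
  else
    false
termination_by (stop - j).toNat
decreasing_by omega

-- the outer 'for i in range(len(L1)-k+1)' loop (early-exit recursion on i, like Python's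
-- lazy range); the trailing 'if not esiste_sottolista_uguale: return False' is the base case
def verifica_outer (L1 : List Int) (L2 : List Int) (k : Int) (i : Int) (stop : Int) : Bool :=
  if h : i < stop then
    let sottolista1 := PySem.List.slice L1 (some i) (some (i + k))
    if verifica_inner sottolista1 L2 k 0 ((L2.length : Int) - k + 1) then
      true
    else
      verifica_outer L1 L2 k (i + 1) stop
  else
    false
termination_by (stop - i).toNat
decreasing_by omega

def verifica_liste (L1 : List Int) (L2 : List Int) (k : Int) : Bool :=
  verifica_outer L1 L2 k 0 ((L1.length : Int) - k + 1)

-- ===== PORT B =====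
def verifica_liste_alt (L1 : List Int) (L2 : List Int) (k : Int) : Bool :=
  let windows2 : PySem.Set (List Int) :=
    PySem.Set.ofList ((PySem.List.pyRange 0 ((L2.length : Int) - k + 1) 1).map
      (fun j => PySem.List.slice L2 (some j) (some (j + k))))
  (PySem.List.pyRange 0 ((L1.length : Int) - k + 1) 1).any
    (fun i => PySem.Set.contains windows2 (PySem.List.slice L1 (some i) (some (i + k))))

-- ===== PRECONDITION & SPEC =====
-- Pre_ restricts to the natural domain k ≥ 0 (a window length): for k < 0 A raises
-- IndexError on many inputs (hanno_sottoliste_uguali indexes past the end of the shorter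
-- wrap-around slice), and where it does return the value reflects accidental negative-stop
-- slicing outside the task's meaning.
def Pre_verifica_liste (L1 : List Int) (L2 : List Int) (k : Int) : Prop := 0 ≤ k
instance (L1 : List Int) (L2 : List Int) (k : Int) : Decidable (Pre_verifica_liste L1 L2 k) := by unfold Pre_verifica_liste; infer_instance
def pvWitness_verifica_liste : List Int × List Int × Int := ([1, 2, 3, 7, 3, 5, 3], [8, 7, 3, 5, 4], 3)

def Spec_verifica_liste (L1 : List Int) (L2 : List Int) (k : Int) (out : Bool) : Prop := out = verifica_liste_alt L1 L2 k
instance (L1 : List Int) (L2 : List Int) (k : Int) (out : Bool) : Decidable (Spec_verifica_liste L1 L2 k out) := by unfold Spec_verifica_liste; infer_instance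

-- ===== CLAIM (what is proved, stated in full; the proofs are below) =====
def Claim_equal_verifica_liste : Prop := ∀ (L1 : List Int) (L2 : List Int) (k : Int), Dom_verifica_liste L1 L2 k → Pre_verifica_liste L1 L2 k → Spec_verifica_liste L1 L2 k (verifica_liste L1 L2 k)

-- ===== LEMMAS AND PROOFS =====

-- hanno_sottoliste_uguali is list equality once the two lists have the same length
theorem hanno_eq_iff (l1 l2 : List Int) (h : l1.length = l2.length) :
    hanno_sottoliste_uguali l1 l2 = true ↔ l1 = l2 := by
  unfold hanno_sottoliste_uguali
  rw [PySem.List.pyRange_zero_nat, List.all_map, List.all_eq_true]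
  constructor
  · intro hall
    apply List.ext_getElem?
    intro n
    by_cases hn : n < l1.length
    · have := hall n (List.mem_range.mpr hn)
      simpa [PySem.List.pyGet?_natCast] using this
    · rw [List.getElem?_eq_none (by omega), List.getElem?_eq_none (by omega)]
  · intro he n _
    subst he
    simp

-- the early-exit index recursions are 'any' over the corresponding range
theorem inner_eq_any (s1 : List Int) (L2 : List Int) (k : Int) (j stop : Int) :
    verifica_inner s1 L2 k j stop =
      (PySem.List.pyRange j stop 1).any
        (fun j' => hanno_sottoliste_uguali s1 (PySem.List.slice L2 (some j') (some (j' + k)))) := by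
  by_cases h : j < stop
  · rw [verifica_inner, dif_pos h, PySem.List.pyRange_one_cons h, List.any_cons,
        inner_eq_any s1 L2 k (j + 1) stop]
    by_cases hh : hanno_sottoliste_uguali s1 (PySem.List.slice L2 (some j) (some (j + k))) <;>
      simp [hh]
  · rw [verifica_inner, dif_neg h, PySem.List.pyRange_one_eq_nil (by omega)]
    simp
termination_by (stop - j).toNat
decreasing_by omega

theorem outer_eq_any (L1 : List Int) (L2 : List Int) (k : Int) (i stop : Int) :
    verifica_outer L1 L2 k i stop =
      (PySem.List.pyRange i stop 1).any (fun i' =>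
        verifica_inner (PySem.List.slice L1 (some i') (some (i' + k))) L2 k 0
          ((L2.length : Int) - k + 1)) := by
  by_cases h : i < stop
  · rw [verifica_outer, dif_pos h, PySem.List.pyRange_one_cons h, List.any_cons,
        outer_eq_any L1 L2 k (i + 1) stop]
    by_cases hh : verifica_inner (PySem.List.slice L1 (some i) (some (i + k))) L2 k 0
        ((L2.length : Int) - k + 1) <;> simp [hh]
  · rw [verifica_outer, dif_neg h, PySem.List.pyRange_one_eq_nil (by omega)]
    simp
termination_by (stop - i).toNat
decreasing_by omega

-- the slices compared inside the loops have equal length (k.toNat each, clamped identically)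
theorem slice_len (L : List Int) (i k : Int) (hk : 0 ≤ k) (hi : 0 ≤ i)
    (hub : i < (L.length : Int) - k + 1) :
    (PySem.List.slice L (some i) (some (i + k))).length = k.toNat := by
  rw [PySem.List.slice_toNat L hi (by omega)]
  have h1 : (i + k).toNat = i.toNat + k.toNat := by omega
  have h2 : i.toNat + k.toNat ≤ L.length := by omega
  simp [h1]
  omega

theorem verifica_eq (L1 : List Int) (L2 : List Int) (k : Int) (hk : 0 ≤ k) :
    verifica_liste L1 L2 k = verifica_liste_alt L1 L2 k := by
  unfold verifica_liste verifica_liste_alt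
  rw [outer_eq_any, Bool.eq_iff_iff]
  simp only [List.any_eq_true, PySem.Set.contains_iff, PySem.Set.mem_ofList, List.mem_map,
    inner_eq_any]
  apply exists_congr; intro i
  apply and_congr_right; intro hi
  apply exists_congr; intro j
  apply and_congr_right; intro hj
  rw [PySem.List.mem_pyRange_one] at hi hj
  have hlen : (PySem.List.slice L1 (some i) (some (i + k))).length =
      (PySem.List.slice L2 (some j) (some (j + k))).length := by
    rw [slice_len L1 i k hk hi.1 hi.2, slice_len L2 j k hk hj.1 hj.2]
  rw [hanno_eq_iff _ _ hlen]
  exact eq_comm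

-- ===== VERDICT (by name: the statement is the Claim_ definition above) =====
theorem verifica_liste_spec : Claim_equal_verifica_liste := by
  intro L1 L2 k _ hk
  exact verifica_eq L1 L2 k hk
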